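-- pv_equiv track=rewrite | github.com/Omar201804104/CSC243---Fall-2022 | Banking System.py | change_password
-- ===== SOURCE A (Python) =====
-- def change_password(user_accounts, log_in, username, old_password, new_password):
--     '''
--     This function allows users to change their password.
--
--     If all of the following requirements are met, changes the password and returns True. Otherwise, returns False.
--     - The username exists in the user_accounts.
--     - The user is logged in (the username is associated with the value True in the log_in dictionary)
--     - The old_password is the user's current password.
--     - The new_password should be different from the old one.
--     - The new_password fulfills the requirement in signup.
--     '''
--     def valid(password):
--
--         isDigit = False
--         isUcase = False
--         isLcase = False
--
--         if len(password) < 8: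
--             return False
--         else:
--             for i in password:
--                 if i.isdigit():
--                     isDigit = True
--                 elif i.isupper():
--                     isUcase = True
--                 elif i.islower():
--                     isLcase = True
--                 else:
--                     continue
--             if isDigit == True and isUcase == True and isLcase == True:
--                 return True
--             else:
--                 return False
--
--     if (username in user_accounts) and (log_in[username] == True):
--         if (old_password == user_accounts[username]) and (old_password != new_password) and (valid(new_password)):
--             user_accounts[username] = new_password
--             return True
--         else:
--             return False
-- ===== SOURCE B (Python) =====
-- DIGITS = "0123456789"
-- UPPERS = "ABCDEFGHIJKLMNOPQRSTUVWXYZ"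
-- LOWERS = "abcdefghijklmnopqrstuvwxyz"
--
-- def change_password(user_accounts, log_in, username, old_password, new_password):
--     if username not in user_accounts or log_in[username] != True:
--         return None
--     chars = set(new_password)
--     ok = (old_password == user_accounts[username]
--           and old_password != new_password
--           and len(new_password) >= 8
--           and not chars.isdisjoint(DIGITS)
--           and not chars.isdisjoint(UPPERS)
--           and not chars.isdisjoint(LOWERS))
--     if ok:
--         user_accounts[username] = new_password
--     return ok
-- ===== Notes on version B (the rewrite author's own statement) =====
-- stated objective: alternative
-- what changed: A classifies each character with predicate calls (isdigit/isupper/islower) in one stateful three-flag elif loop; B instead builds the hash set of the password's characters once and decides each requirement by set-disjointness against explicit character-class tables (string constants), with the nested-if outer control flow replaced by a guard clause and one computed boolean returned directly; equal on the printable-ASCII domain because there the predicates coincide with membership in those tables.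
import Mathlib
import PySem

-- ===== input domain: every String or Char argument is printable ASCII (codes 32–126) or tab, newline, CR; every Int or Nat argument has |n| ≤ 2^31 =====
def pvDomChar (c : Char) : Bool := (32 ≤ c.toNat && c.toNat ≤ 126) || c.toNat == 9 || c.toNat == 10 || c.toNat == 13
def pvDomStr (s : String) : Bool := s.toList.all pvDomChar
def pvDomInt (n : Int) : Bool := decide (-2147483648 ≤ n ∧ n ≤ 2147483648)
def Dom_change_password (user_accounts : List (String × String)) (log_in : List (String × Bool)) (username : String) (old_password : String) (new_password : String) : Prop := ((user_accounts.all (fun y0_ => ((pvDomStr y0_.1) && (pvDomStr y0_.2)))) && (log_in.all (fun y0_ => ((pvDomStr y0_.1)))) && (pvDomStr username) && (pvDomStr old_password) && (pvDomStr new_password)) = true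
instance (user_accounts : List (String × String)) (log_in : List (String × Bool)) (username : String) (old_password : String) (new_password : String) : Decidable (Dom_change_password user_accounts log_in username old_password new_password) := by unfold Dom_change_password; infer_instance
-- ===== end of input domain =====

-- B replaces A's single three-flag predicate loop by a set of the password's characters tested for
-- disjointness against explicit character-class tables, and a guard-clause outer decomposition
-- (alternative; same cost). A mutates user_accounts in place on success (B performs the same mutation
-- in Python); the equivalence proved here is about the RETURN value only.

-- dict[k] / 'k in dict' on an association list: first-match lookup (shared dict primitive)
def pvLookup? {α : Type} (d : List (String × α)) (k : String) : Option α :=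
  (d.find? (fun p => p.1 == k)).map (·.2)

-- ===== PORT A =====
-- A's inner 'valid': len check, then one pass maintaining three flags via an elif chain
def pvValidA (password : String) : Bool :=
  if PySem.Str.len password < 8 then false
  else
    let r := password.toList.foldl
      (fun (st : Bool × Bool × Bool) i =>
        if PySem.Chars.isdigit i then (true, st.2.1, st.2.2)
        else if PySem.Chars.isupper i then (st.1, true, st.2.2)
        else if PySem.Chars.islower i then (st.1, st.2.1, true)
        else st)
      (false, false, false)
    if r.1 && r.2.1 && r.2.2 then true else false

def change_password (user_accounts : List (String × String)) (log_in : List (String × Bool)) (username : String) (old_password : String) (new_password : String) : Option Bool :=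
  if (user_accounts.map Prod.fst).contains username then
    match pvLookup? log_in username with
    | none => none  -- Python raises KeyError here; excluded by Pre_change_password
    | some b =>
      if b == true then
        if (old_password == (pvLookup? user_accounts username).getD "")
            && !(old_password == new_password) && pvValidA new_password
        then some true
        else some false
      else none  -- outer condition false: A falls through, implicit None
  else none

-- ===== PORT B =====
-- B's module constants DIGITS/UPPERS/LOWERS, as their character lists (the set operation below
-- consumes a string constant as an iterable of its characters — exact)
def pvDigits : List Char := ['0','1','2','3','4','5','6','7','8','9']
def pvUppers : List Char := ['A','B','C','D','E','F','G','H','I','J','K','L','M','N','O','P','Q','R','S','T','U','V','W','X','Y','Z']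
def pvLowers : List Char := ['a','b','c','d','e','f','g','h','i','j','k','l','m','n','o','p','q','r','s','t','u','v','w','x','y','z']

-- B's validity: chars = set(new_password); length bound and three set-disjointness tests
def pvValidB (password : String) : Bool :=
  let chars : PySem.Set Char := PySem.Set.ofList password.toList
  decide (8 ≤ PySem.Str.len password)
    && !(PySem.Set.isdisjoint chars pvDigits)
    && !(PySem.Set.isdisjoint chars pvUppers)
    && !(PySem.Set.isdisjoint chars pvLowers)

def change_password_alt (user_accounts : List (String × String)) (log_in : List (String × Bool)) (username : String) (old_password : String) (new_password : String) : Option Bool :=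
  if !((user_accounts.map Prod.fst).contains username) then none
  else
    match pvLookup? log_in username with
    | none => none  -- KeyError in Python; excluded by Pre_change_password
    | some b =>
      if !(b == true) then none
      else
        some ((old_password == (pvLookup? user_accounts username).getD "")
              && !(old_password == new_password) && pvValidB new_password)

-- ===== PRECONDITION & SPEC =====
-- Pre_ excludes exactly the inputs where Python A (and B) raise KeyError: username is a key of
-- user_accounts but not a key of log_in.
def Pre_change_password (user_accounts : List (String × String)) (log_in : List (String × Bool)) (username : String) (_old_password : String) (_new_password : String) : Prop :=
  (user_accounts.map Prod.fst).contains username = true → (log_in.map Prod.fst).contains username = true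
instance (user_accounts : List (String × String)) (log_in : List (String × Bool)) (username : String) (old_password : String) (new_password : String) : Decidable (Pre_change_password user_accounts log_in username old_password new_password) := by unfold Pre_change_password; infer_instance

def pvWitness_change_password : (List (String × String)) × (List (String × Bool)) × String × String × String :=
  ([("bob", "Oldpass1a")], [("bob", true)], "bob", "Oldpass1a", "Newpass1x")

def Spec_change_password (user_accounts : List (String × String)) (log_in : List (String × Bool)) (username : String) (old_password : String) (new_password : String) (out : Option Bool) : Prop := out = change_password_alt user_accounts log_in username old_password new_password
instance (user_accounts : List (String × String)) (log_in : List (String × Bool)) (username : String) (old_password : String) (new_password : String) (out : Option Bool) : Decidable (Spec_change_password user_accounts log_in username old_password new_password out) := by unfold Spec_change_password; infer_instance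

-- ===== CLAIM (what is proved, stated in full; the proofs are below) =====
def Claim_equal_change_password : Prop := ∀ (user_accounts : List (String × String)) (log_in : List (String × Bool)) (username : String) (old_password : String) (new_password : String), Dom_change_password user_accounts log_in username old_password new_password → Pre_change_password user_accounts log_in username old_password new_password → Spec_change_password user_accounts log_in username old_password new_password (change_password user_accounts log_in username old_password new_password)

-- ===== LEMMAS AND PROOFS =====

theorem pvChar_eq_iff_toNat (c d : Char) : c = d ↔ c.toNat = d.toNat :=
  ⟨by rintro rfl; rfl, fun h => Char.ext (UInt32.toNat_inj.mp h)⟩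

theorem pvDigit_not_upper (c : Char) (h : PySem.Chars.isdigit c = true) : PySem.Chars.isupper c = false := by
  simp [PySem.Chars.isdigit, PySem.Chars.isupper, Char.le_def, UInt32.le_iff_toNat_le] at *
  omega

theorem pvDigit_not_lower (c : Char) (h : PySem.Chars.isdigit c = true) : PySem.Chars.islower c = false := by
  simp [PySem.Chars.isdigit, PySem.Chars.islower, Char.le_def, UInt32.le_iff_toNat_le] at *
  omega

theorem pvUpper_not_lower (c : Char) (h : PySem.Chars.isupper c = true) : PySem.Chars.islower c = false := by
  simp [PySem.Chars.isupper, PySem.Chars.islower, Char.le_def, UInt32.le_iff_toNat_le] at *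
  omega

-- the class tables name exactly the characters the predicates accept
theorem pvMem_digits (c : Char) : c ∈ pvDigits ↔ PySem.Chars.isdigit c = true := by
  simp [PySem.Chars.isdigit, Char.le_def, UInt32.le_iff_toNat_le, pvDigits, pvChar_eq_iff_toNat]
  omega

theorem pvMem_uppers (c : Char) : c ∈ pvUppers ↔ PySem.Chars.isupper c = true := by
  simp [PySem.Chars.isupper, Char.le_def, UInt32.le_iff_toNat_le, pvUppers, pvChar_eq_iff_toNat]
  omega

theorem pvMem_lowers (c : Char) : c ∈ pvLowers ↔ PySem.Chars.islower c = true := by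
  simp [PySem.Chars.islower, Char.le_def, UInt32.le_iff_toNat_le, pvLowers, pvChar_eq_iff_toNat]
  omega

-- a non-disjointness test against a class table is the existential scan with the predicate
theorem pvNotDisjoint (cs t : List Char) (f : Char → Bool) (ht : ∀ c, c ∈ t ↔ f c = true) :
    (!PySem.Set.isdisjoint (PySem.Set.ofList cs) t) = cs.any f := by
  rw [Bool.eq_iff_iff]
  rw [Bool.not_eq_eq_eq_not, Bool.not_true, ← Bool.not_eq_true, PySem.Set.isdisjoint_iff]
  simp only [PySem.Set.mem_ofList, List.any_eq_true, ht]
  push_neg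
  constructor
  · rintro ⟨x, hx, hfx⟩; exact ⟨x, hx, by simpa using hfx⟩
  · rintro ⟨x, hx, hfx⟩; exact ⟨x, hx, by simpa using hfx⟩

-- A's flag loop computes exactly the three existential scans
theorem pvFlags_loop (cs : List Char) (d u l : Bool) :
    cs.foldl
      (fun (st : Bool × Bool × Bool) i =>
        if PySem.Chars.isdigit i then (true, st.2.1, st.2.2)
        else if PySem.Chars.isupper i then (st.1, true, st.2.2)
        else if PySem.Chars.islower i then (st.1, st.2.1, true)
        else st)
      (d, u, l)
    = (d || cs.any PySem.Chars.isdigit, u || cs.any PySem.Chars.isupper, l || cs.any PySem.Chars.islower) := by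
  induction cs generalizing d u l with
  | nil => simp
  | cons c cs ih =>
    simp only [List.foldl_cons, List.any_cons]
    by_cases h1 : PySem.Chars.isdigit c = true
    · simp [h1, ih, pvDigit_not_upper c h1, pvDigit_not_lower c h1]
    · by_cases h2 : PySem.Chars.isupper c = true
      · simp [h1, h2, ih, pvUpper_not_lower c h2]
      · by_cases h3 : PySem.Chars.islower c = true
        · simp [h1, h2, h3, ih]
        · simp [h1, h2, h3, ih]

theorem pvValid_eq (p : String) : pvValidA p = pvValidB p := by
  unfold pvValidA pvValidB
  simp only [PySem.Str.len_eq,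
    pvNotDisjoint p.toList pvDigits PySem.Chars.isdigit pvMem_digits,
    pvNotDisjoint p.toList pvUppers PySem.Chars.isupper pvMem_uppers,
    pvNotDisjoint p.toList pvLowers PySem.Chars.islower pvMem_lowers]
  by_cases hl : (p.length : Int) < 8
  · simp [hl]
    intro h
    exact absurd h (by omega)
  · rw [Bool.eq_iff_iff]
    simp [hl, pvFlags_loop, List.any_eq_true, Bool.and_assoc]
    intros
    omega

-- a key present in the key list has a first-match value
theorem pvLookup?_isSome {α : Type} (d : List (String × α)) (k : String)
    (h : (d.map Prod.fst).contains k = true) : ∃ v, pvLookup? d k = some v := by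
  unfold pvLookup?
  rw [List.contains_iff_mem] at h
  simp only [List.mem_map] at h
  obtain ⟨p, hp, hk⟩ := h
  have : (d.find? (fun p => p.1 == k)).isSome = true := by
    rw [List.find?_isSome]
    exact ⟨p, hp, by simp [hk]⟩
  obtain ⟨q, hq⟩ := Option.isSome_iff_exists.mp this
  exact ⟨q.2, by simp [hq]⟩

-- ===== VERDICT (by name: the statement is the Claim_ definition above) =====
theorem change_password_spec : Claim_equal_change_password := by
  intro ua lg u op np _ hpre
  unfold Spec_change_password change_password change_password_alt
  by_cases hc : (ua.map Prod.fst).contains u = true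
  · obtain ⟨b, hb⟩ := pvLookup?_isSome lg u (hpre hc)
    rw [hc, hb]
    cases b
    · simp
    · rw [pvValid_eq]
      cases hC : ((op == (pvLookup? ua u).getD "") && !(op == np) && pvValidB np) <;>
        simp_all [Bool.and_assoc]
  · have hc' : (List.map Prod.fst ua).contains u = false := by
      cases h : (List.map Prod.fst ua).contains u <;> simp_all
    rw [hc']
    simp
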